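-- pv_equiv track=rewrite | github.com/yan-roo/SAM-Studio | app/worker/tasks.py | _build_chunk_ranges
-- ===== SOURCE A (Python) =====
-- def _build_chunk_ranges(
--     total_len: int, chunk_samples: int, overlap_samples: int
-- ) -> list[tuple[int, int]]:
--     ranges: list[tuple[int, int]] = []
--     if total_len <= 0:
--         return ranges
--     step = max(1, chunk_samples - overlap_samples)
--     start = 0
--     while start < total_len:
--         end = min(start + chunk_samples, total_len)
--         ranges.append((start, end))
--         if end == total_len:
--             break
--         start += step
--     return ranges
-- ===== SOURCE B (Python) =====
-- def _build_chunk_ranges(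
--     total_len: int, chunk_samples: int, overlap_samples: int
-- ) -> list[tuple[int, int]]:
--     if total_len <= 0:
--         return []
--     step = max(1, chunk_samples - overlap_samples)
--     n_starts = (total_len + step - 1) // step              # starts strictly below total_len
--     full = (total_len - chunk_samples + step - 1) // step  # first start whose chunk reaches the end
--     n = min(max(full, 0), n_starts - 1) + 1
--     return [(i * step, min(i * step + chunk_samples, total_len)) for i in range(n)]
-- ===== Notes on version B (the rewrite author's own statement) =====
-- stated objective: alternative
-- what changed: Replaces the while-loop with an early break by a closed-form chunk count (ceil divisions clamped with min/max) followed by a single range comprehension.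
import Mathlib
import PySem

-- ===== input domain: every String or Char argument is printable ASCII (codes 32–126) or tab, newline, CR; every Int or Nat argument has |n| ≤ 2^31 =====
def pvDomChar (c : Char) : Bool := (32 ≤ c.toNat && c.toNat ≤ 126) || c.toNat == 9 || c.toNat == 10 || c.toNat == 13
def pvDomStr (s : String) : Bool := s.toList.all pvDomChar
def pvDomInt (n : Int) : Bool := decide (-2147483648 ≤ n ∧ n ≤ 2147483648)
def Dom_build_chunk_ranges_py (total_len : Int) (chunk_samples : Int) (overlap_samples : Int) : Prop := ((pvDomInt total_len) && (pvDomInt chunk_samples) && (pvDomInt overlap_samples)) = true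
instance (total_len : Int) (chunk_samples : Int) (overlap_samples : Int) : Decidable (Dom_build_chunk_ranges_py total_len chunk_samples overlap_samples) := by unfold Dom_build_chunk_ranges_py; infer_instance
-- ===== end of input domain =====

-- B replaces A's while-loop-with-break by a closed-form chunk count (ceil divisions clamped with min/max) and a single range comprehension (objective: alternative decomposition; same asymptotic cost).

-- ===== PORT A =====
-- the while loop of A; `hs` only justifies termination (step = max 1 … ≥ 1 at the call site)
def bcrLoop (total_len chunk_samples step start : Int) (hs : 1 ≤ step) : List (Int × Int) :=
  if _h : start < total_len then
    let e := min (start + chunk_samples) total_len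
    if e = total_len then [(start, e)]
    else (start, e) :: bcrLoop total_len chunk_samples step (start + step) hs
  else []
termination_by (total_len - start).toNat
decreasing_by omega

def build_chunk_ranges_py (total_len : Int) (chunk_samples : Int) (overlap_samples : Int) : List (Int × Int) :=
  if total_len ≤ 0 then []
  else bcrLoop total_len chunk_samples (max 1 (chunk_samples - overlap_samples)) 0 (le_max_left _ _)

-- ===== PORT B =====
def build_chunk_ranges_py_alt (total_len : Int) (chunk_samples : Int) (overlap_samples : Int) : List (Int × Int) :=
  if total_len ≤ 0 then []
  else
    let step := max 1 (chunk_samples - overlap_samples)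
    let n_starts := PySem.Int.floordiv (total_len + step - 1) step
    let full := PySem.Int.floordiv (total_len - chunk_samples + step - 1) step
    let n := min (max full 0) (n_starts - 1) + 1
    (PySem.List.pyRange 0 n 1).map (fun i => (i * step, min (i * step + chunk_samples) total_len))

-- ===== PRECONDITION & SPEC =====
def Spec_build_chunk_ranges_py (total_len : Int) (chunk_samples : Int) (overlap_samples : Int) (out : List (Int × Int)) : Prop := out = build_chunk_ranges_py_alt total_len chunk_samples overlap_samples
instance (total_len : Int) (chunk_samples : Int) (overlap_samples : Int) (out : List (Int × Int)) : Decidable (Spec_build_chunk_ranges_py total_len chunk_samples overlap_samples out) := by unfold Spec_build_chunk_ranges_py; infer_instance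

-- ===== CLAIM (what is proved, stated in full; the proofs are below) =====
def Claim_equal_build_chunk_ranges_py : Prop := ∀ (total_len : Int) (chunk_samples : Int) (overlap_samples : Int), Dom_build_chunk_ranges_py total_len chunk_samples overlap_samples → Spec_build_chunk_ranges_py total_len chunk_samples overlap_samples (build_chunk_ranges_py total_len chunk_samples overlap_samples)

-- ===== LEMMAS AND PROOFS =====

-- the loop, started at start = k*step, emits exactly the indexed chunks k..n-1
lemma bcrLoop_eq (total chunk step : Int) (hs : 1 ≤ step) (n : Int)
    (F2 : (n - 1) * step < total)
    (F3 : ∀ i : Int, 0 ≤ i → i < n - 1 → i * step + chunk < total)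
    (F4 : total ≤ (n - 1) * step + chunk ∨ total ≤ (n - 1) * step + step) :
    ∀ (m : Nat) (k : Int), 0 ≤ k → k + m = n → 1 ≤ m →
      bcrLoop total chunk step (k * step) hs =
        (PySem.List.pyRange k n 1).map (fun i => (i * step, min (i * step + chunk) total)) := by
  intro m
  induction m with
  | zero => intro k _ _ hm; omega
  | succ m' ih =>
    intro k hk0 hkm _
    have hkn1 : k ≤ n - 1 := by omega
    have hkstep : k * step ≤ (n - 1) * step :=
      mul_le_mul_of_nonneg_right hkn1 (by omega)
    have hstart : k * step < total := lt_of_le_of_lt hkstep F2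
    rw [PySem.List.pyRange_one_cons (by omega : k < n)]
    rw [bcrLoop]
    simp only [hstart, dif_pos, List.map_cons]
    by_cases hm' : m' = 0
    · -- k = n - 1 : last iteration
      have hkn : k = n - 1 := by omega
      have hks : k * step = (n - 1) * step := by rw [hkn]
      have hnil : PySem.List.pyRange (k + 1) n 1 = [] :=
        PySem.List.pyRange_one_eq_nil (by omega)
      rw [hnil]
      by_cases he : min (k * step + chunk) total = total
      · simp [he]
      · -- no break: the next start is ≥ total, loop returns []
        have hlt : k * step + chunk < total := by
          rcases lt_or_ge (k * step + chunk) total with h | h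
          · exact h
          · exact absurd (min_eq_right h) he
        have hF4 : total ≤ (n - 1) * step + step := by
          rcases F4 with h | h
          · omega
          · exact h
        simp only [he, List.map_nil]
        rw [bcrLoop]
        have : ¬ (k * step + step < total) := by omega
        simp [this]
    · -- k < n - 1 : middle iteration
      have hlt : k * step + chunk < total := F3 k hk0 (by omega)
      have he : min (k * step + chunk) total ≠ total := by
        rw [min_eq_left (le_of_lt hlt)]; omega
      simp only [if_neg he]
      have : k * step + step = (k + 1) * step := by ring
      rw [this, ih (k + 1) (by omega) (by omega) (by omega)]

-- ===== VERDICT (by name: the statement is the Claim_ definition above) =====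
theorem build_chunk_ranges_py_spec : Claim_equal_build_chunk_ranges_py := by
  intro total chunk overlap _
  unfold Spec_build_chunk_ranges_py build_chunk_ranges_py build_chunk_ranges_py_alt
  by_cases ht : total ≤ 0
  · simp [ht]
  · simp only [if_neg ht]
    have ht1 : 1 ≤ total := by omega
    set step : Int := max 1 (chunk - overlap) with hstepdef
    have hs : 1 ≤ step := le_max_left _ _
    have hs0 : 0 < step := by omega
    set nall : Int := PySem.Int.floordiv (total + step - 1) step with hnall
    have hnall1 : (nall - 1) * step ≤ total - 1 := by
      have h := (PySem.Int.le_floordiv_iff_mul_le (a := total + step - 1) (b := step)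
        (q := nall) hs0).mp le_rfl
      nlinarith
    have hnall2 : total - 1 < nall * step := by
      have h := (PySem.Int.floordiv_lt_iff_lt_mul (a := total + step - 1) (b := step)
        (q := nall + 1) hs0).mp (by omega)
      nlinarith
    have hnall0 : 1 ≤ nall := by
      have : 1 ≤ PySem.Int.floordiv (total + step - 1) step :=
        (PySem.Int.le_floordiv_iff_mul_le (q := 1) hs0).mpr (by omega)
      omega
    set j0 : Int := PySem.Int.floordiv (total - chunk + step - 1) step with hj0
    have hceil : (j0 - 1) * step < total - chunk ∧ total - chunk ≤ j0 * step := by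
      constructor
      · have h := (PySem.Int.le_floordiv_iff_mul_le (a := total - chunk + step - 1) (b := step)
          (q := j0) hs0).mp le_rfl
        nlinarith
      · have h := (PySem.Int.floordiv_lt_iff_lt_mul (a := total - chunk + step - 1) (b := step)
          (q := j0 + 1) hs0).mp (by omega)
        nlinarith
    set n : Int := min (max j0 0) (nall - 1) + 1 with hn
    have F1 : 1 ≤ n := by
      have : 0 ≤ min (max j0 0) (nall - 1) := le_min (le_max_right _ _) (by omega)
      omega
    have F2 : (n - 1) * step < total := by
      have hle : n - 1 ≤ nall - 1 := by
        have := min_le_right (max j0 0) (nall - 1); omega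
      have : (n - 1) * step ≤ (nall - 1) * step :=
        mul_le_mul_of_nonneg_right hle (by omega)
      omega
    have F3 : ∀ i : Int, 0 ≤ i → i < n - 1 → i * step + chunk < total := by
      intro i hi0 hi
      have hnle : n - 1 ≤ max j0 0 := by
        have := min_le_left (max j0 0) (nall - 1); omega
      have hij : i ≤ j0 - 1 := by
        rcases le_or_gt j0 0 with h | h
        · omega
        · omega
      have : i * step ≤ (j0 - 1) * step :=
        mul_le_mul_of_nonneg_right hij (by omega)
      omega
    have F4 : total ≤ (n - 1) * step + chunk ∨ total ≤ (n - 1) * step + step := by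
      rcases le_total (max j0 0) (nall - 1) with h | h
      · left
        have hmin : n - 1 = max j0 0 := by rw [hn]; omega
        rcases le_or_gt j0 0 with hj | hj
        · have : j0 * step ≤ 0 := mul_nonpos_of_nonpos_of_nonneg hj (by omega)
          have hm0 : n - 1 = 0 := by omega
          rw [hm0]; have := hceil.2; omega
        · have hm0 : n - 1 = j0 := by omega
          rw [hm0]; have := hceil.2; omega
      · right
        have hm0 : n - 1 = nall - 1 := by rw [hn]; omega
        rw [hm0]
        have : (nall - 1) * step + step = nall * step := by ring
        omega
    have hmain := bcrLoop_eq total chunk step hs n F2 F3 F4 n.toNat 0 le_rfl (by omega) (by omega)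
    rw [zero_mul] at hmain
    exact hmain
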